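-- pv_equiv track=rewrite | github.com/jvnk0671/inter_autoprompting | promptomatix/src/promptomatix/utils/parsing.py | _split_dict_pairs
-- ===== SOURCE A (Python) =====
-- from typing import Union, Dict, List
--
-- def _split_dict_pairs(content: str) -> List[str]:
--     """Split dictionary content into key-value pairs."""
--     pairs = []
--     current_pair = []
--     in_quotes = False
--     quote_char = None
--
--     for char in content:
--         if char in ['"', "'"]:
--             if not in_quotes:
--                 in_quotes = True
--                 quote_char = char
--             elif char == quote_char:
--                 in_quotes = False
--                 quote_char = None
--         elif char == ',' and not in_quotes:
--             pairs.append(''.join(current_pair).strip())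
--             current_pair = []
--             continue
--         current_pair.append(char)
--
--     if current_pair:
--         pairs.append(''.join(current_pair).strip())
--
--     return pairs
-- ===== SOURCE B (Python) =====
-- from typing import List
--
-- def _split_dict_pairs(content: str) -> List[str]:
--     """Split dictionary content into key-value pairs."""
--     # First pass: find the indices of unquoted commas.
--     seps = []
--     in_quotes = False
--     quote_char = None
--     for i, ch in enumerate(content):
--         if ch in ('"', "'"):
--             if not in_quotes:
--                 in_quotes = True
--                 quote_char = ch
--             elif ch == quote_char:
--                 in_quotes = False
--                 quote_char = None
--         elif ch == ',' and not in_quotes: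
--             seps.append(i)
--     # Second pass: cut the string at those indices.
--     pairs = []
--     prev = 0
--     for s in seps:
--         pairs.append(content[prev:s].strip())
--         prev = s + 1
--     last = content[prev:]
--     if last != '':
--         pairs.append(last.strip())
--     return pairs
-- ===== Notes on version B (the rewrite author's own statement) =====
-- stated objective: alternative
-- what changed: B separates boundary-finding from segment production: a first pass records only the indices of unquoted commas, then a second pass slices the string at those indices (stripping each slice, and dropping only a zero-length trailing slice), instead of A's single pass that accumulates characters and flushes a buffer at each comma.
import Mathlib
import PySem

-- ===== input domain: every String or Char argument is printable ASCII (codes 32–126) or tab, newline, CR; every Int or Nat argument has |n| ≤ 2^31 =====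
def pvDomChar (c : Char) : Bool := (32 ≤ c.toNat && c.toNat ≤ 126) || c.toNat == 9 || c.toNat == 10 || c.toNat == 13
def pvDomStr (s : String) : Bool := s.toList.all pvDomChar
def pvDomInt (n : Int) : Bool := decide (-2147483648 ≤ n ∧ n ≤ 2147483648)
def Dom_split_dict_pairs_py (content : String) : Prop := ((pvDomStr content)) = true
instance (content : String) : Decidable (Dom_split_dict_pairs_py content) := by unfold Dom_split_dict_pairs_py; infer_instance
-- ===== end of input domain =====

-- B separates boundary-finding (indices of unquoted commas) from segment production (slicing);
-- objective: alternative decomposition, same cost. Equivalence proved on all inputs.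

-- ===== PORT A =====
-- one loop step of A: quote tracking, unquoted comma flushes current_pair, else append char
def pvStepA (st : List String × List Char × Bool × Option Char) (c : Char) :
    List String × List Char × Bool × Option Char :=
  match st with
  | (pairs, cur, inq, qc) =>
    if c = '"' ∨ c = '\'' then
      if ¬ inq then (pairs, cur ++ [c], true, some c)
      else if some c = qc then (pairs, cur ++ [c], false, none)
      else (pairs, cur ++ [c], inq, qc)
    else if c = ',' ∧ ¬ inq then (pairs ++ [PySem.Str.strip (String.ofList cur)], [], inq, qc)
    else (pairs, cur ++ [c], inq, qc)

def split_dict_pairs_py (content : String) : List String :=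
  match content.toList.foldl pvStepA ([], [], false, none) with
  | (pairs, cur, _, _) =>
    if cur ≠ [] then pairs ++ [PySem.Str.strip (String.ofList cur)] else pairs

-- ===== PORT B =====
-- first pass of B: same quote tracking, but only records the index of each unquoted comma
def pvStepB (st : List Int × Bool × Option Char) (ic : Int × Char) : List Int × Bool × Option Char :=
  match st, ic with
  | (seps, inq, qc), (i, c) =>
    if c = '"' ∨ c = '\'' then
      if ¬ inq then (seps, true, some c)
      else if some c = qc then (seps, false, none)
      else (seps, inq, qc)
    else if c = ',' ∧ ¬ inq then (seps ++ [i], inq, qc)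
    else (seps, inq, qc)

def split_dict_pairs_py_alt (content : String) : List String :=
  let L := content.toList
  match (PySem.List.enumerate L).foldl pvStepB ([], false, none) with
  | (seps, _, _) =>
    match seps.foldl
        (fun (st : List String × Int) s =>
          (st.1 ++ [PySem.Str.strip (String.ofList (PySem.List.slice L (some st.2) (some s)))], s + 1))
        ([], 0) with
    | (pairs, prev) =>
      let last := PySem.List.slice L (some prev) none
      if last ≠ [] then pairs ++ [PySem.Str.strip (String.ofList last)] else pairs

-- ===== PRECONDITION & SPEC =====
def Spec_split_dict_pairs_py (content : String) (out : List String) : Prop := out = split_dict_pairs_py_alt content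
instance (content : String) (out : List String) : Decidable (Spec_split_dict_pairs_py content out) := by unfold Spec_split_dict_pairs_py; infer_instance

-- ===== CLAIM (what is proved, stated in full; the proofs are below) =====
def Claim_equal_split_dict_pairs_py : Prop := ∀ (content : String), Dom_split_dict_pairs_py content → Spec_split_dict_pairs_py content (split_dict_pairs_py content)

-- ===== LEMMAS AND PROOFS =====

-- common specification: the segments of `rest`, given quote state and the chars collected so far
def pvSegs : List Char → Bool → Option Char → List Char → List String
  | [], _, _, cur => if cur ≠ [] then [PySem.Str.strip (String.ofList cur)] else []
  | c :: rest, inq, qc, cur =>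
    if c = '"' ∨ c = '\'' then
      if ¬ inq then pvSegs rest true (some c) (cur ++ [c])
      else if some c = qc then pvSegs rest false none (cur ++ [c])
      else pvSegs rest inq qc (cur ++ [c])
    else if c = ',' ∧ ¬ inq then
      PySem.Str.strip (String.ofList cur) :: pvSegs rest inq qc []
    else pvSegs rest inq qc (cur ++ [c])

-- A's loop followed by its final flush computes pvSegs
lemma pvA_runs (l : List Char) (pairs : List String) (cur : List Char) (inq : Bool) (qc : Option Char) :
    (if (l.foldl pvStepA (pairs, cur, inq, qc)).2.1 ≠ [] then
        (l.foldl pvStepA (pairs, cur, inq, qc)).1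
          ++ [PySem.Str.strip (String.ofList (l.foldl pvStepA (pairs, cur, inq, qc)).2.1)]
      else (l.foldl pvStepA (pairs, cur, inq, qc)).1)
      = pairs ++ pvSegs l inq qc cur := by
  induction l generalizing pairs cur inq qc with
  | nil =>
    simp only [List.foldl_nil, pvSegs]
    split_ifs <;> simp
  | cons c rest ih =>
    simp only [List.foldl_cons]
    by_cases h : c = '"' ∨ c = '\''
    · by_cases h1 : inq = true
      · by_cases h2 : some c = qc
        · rw [show pvStepA (pairs, cur, inq, qc) c = (pairs, cur ++ [c], false, none) from by
            simp [pvStepA, h, h1, h2], ih]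
          simp [pvSegs, h, h1, h2]
        · rw [show pvStepA (pairs, cur, inq, qc) c = (pairs, cur ++ [c], inq, qc) from by
            simp [pvStepA, h, h1, h2], ih]
          simp [pvSegs, h, h1, h2]
      · rw [show pvStepA (pairs, cur, inq, qc) c = (pairs, cur ++ [c], true, some c) from by
          simp [pvStepA, h, h1], ih]
        simp [pvSegs, h, h1]
    · by_cases h1 : c = ',' ∧ ¬ inq = true
      · rw [show pvStepA (pairs, cur, inq, qc) c
            = (pairs ++ [PySem.Str.strip (String.ofList cur)], [], inq, qc) from by
          simp [pvStepA, h, h1], ih]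
        simp [pvSegs, h, h1]
      · rw [show pvStepA (pairs, cur, inq, qc) c = (pairs, cur ++ [c], inq, qc) from by
          simp only [pvStepA]; rw [if_neg h, if_neg h1], ih]
        simp only [pvSegs]
        rw [if_neg h, if_neg h1]

-- B's first pass (from index i) computes these separator indices
def pvSepsRec : Nat → List Char → Bool → Option Char → List Int
  | _, [], _, _ => []
  | i, c :: rest, inq, qc =>
    if c = '"' ∨ c = '\'' then
      if ¬ inq then pvSepsRec (i + 1) rest true (some c)
      else if some c = qc then pvSepsRec (i + 1) rest false none
      else pvSepsRec (i + 1) rest inq qc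
    else if c = ',' ∧ ¬ inq then (i : Int) :: pvSepsRec (i + 1) rest inq qc
    else pvSepsRec (i + 1) rest inq qc

lemma pvB_firstPass (l : List Char) (i : Nat) (seps : List Int) (inq : Bool) (qc : Option Char) :
    ((PySem.List.enumerate l (i : Int)).foldl pvStepB (seps, inq, qc)).1
      = seps ++ pvSepsRec i l inq qc := by
  induction l generalizing i seps inq qc with
  | nil => simp [PySem.List.enumerate_nil, pvSepsRec]
  | cons c rest ih =>
    rw [PySem.List.enumerate_cons]
    simp only [List.foldl_cons]
    have h1 : ((i : Int) + 1) = ((i + 1 : Nat) : Int) := by push_cast; ring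
    rw [h1]
    by_cases h : c = '"' ∨ c = '\''
    · by_cases hq : inq = true
      · by_cases h3 : some c = qc
        · rw [show pvStepB (seps, inq, qc) ((i : Int), c) = (seps, false, none) from by
            simp [pvStepB, h, hq, h3], ih]
          simp [pvSepsRec, h, hq, h3]
        · rw [show pvStepB (seps, inq, qc) ((i : Int), c) = (seps, inq, qc) from by
            simp [pvStepB, h, hq, h3], ih]
          simp [pvSepsRec, h, hq, h3]
      · rw [show pvStepB (seps, inq, qc) ((i : Int), c) = (seps, true, some c) from by
          simp [pvStepB, h, hq], ih]
        simp [pvSepsRec, h, hq]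
    · by_cases h1 : c = ',' ∧ ¬ inq = true
      · rw [show pvStepB (seps, inq, qc) ((i : Int), c) = (seps ++ [(i : Int)], inq, qc) from by
          simp [pvStepB, h, h1], ih]
        simp [pvSepsRec, h, h1]
      · rw [show pvStepB (seps, inq, qc) ((i : Int), c) = (seps, inq, qc) from by
          simp only [pvStepB]; rw [if_neg h, if_neg h1], ih]
        simp only [pvSepsRec]
        rw [if_neg h, if_neg h1]

-- B's second-pass fold step
def pvStep2 (L : List Char) (st : List String × Int) (s : Int) : List String × Int :=
  (st.1 ++ [PySem.Str.strip (String.ofList (PySem.List.slice L (some st.2) (some s)))], s + 1)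

-- B's second pass over pvSepsRec computes pvSegs, with cur = the slice from prev to i
lemma pvB_secondPass (L : List Char) (rest : List Char) (i prev : Nat) (pairs : List String)
    (inq : Bool) (qc : Option Char)
    (hrest : rest = L.drop i) (hprev : prev ≤ i) (hi : i ≤ L.length) :
    (if (PySem.List.slice L (some ((pvSepsRec i rest inq qc).foldl (pvStep2 L) (pairs, (prev : Int))).2) none) ≠ [] then
        ((pvSepsRec i rest inq qc).foldl (pvStep2 L) (pairs, (prev : Int))).1
          ++ [PySem.Str.strip (String.ofList
              (PySem.List.slice L (some ((pvSepsRec i rest inq qc).foldl (pvStep2 L) (pairs, (prev : Int))).2) none))]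
      else ((pvSepsRec i rest inq qc).foldl (pvStep2 L) (pairs, (prev : Int))).1)
      = pairs ++ pvSegs rest inq qc ((L.drop prev).take (i - prev)) := by
  induction rest generalizing i prev pairs inq qc with
  | nil =>
    simp only [pvSepsRec, List.foldl_nil, pvSegs]
    rw [PySem.List.slice_from_natCast]
    have hlen : i = L.length := by
      have := congrArg List.length hrest
      simp at this; omega
    have htake : (L.drop prev).take (i - prev) = L.drop prev := by
      apply List.take_of_length_le
      simp; omega
    rw [htake]
    split_ifs <;> simp
  | cons c rest' ih =>
    have hc : L[i]? = some c := by
      have : (L.drop i)[0]? = some c := by rw [← hrest]; rfl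
      simpa using this
    have hi' : i < L.length := by
      by_contra h
      have : L.drop i = [] := List.drop_eq_nil_of_le (by omega)
      rw [this] at hrest; simp at hrest
    have hrest' : rest' = L.drop (i + 1) := by
      have := congrArg List.tail hrest
      simpa [List.tail_drop] using this
    have hext : (L.drop prev).take (i + 1 - prev) = (L.drop prev).take (i - prev) ++ [c] := by
      have h1 : i + 1 - prev = (i - prev) + 1 := by omega
      rw [h1, List.take_add_one]
      have : (L.drop prev)[i - prev]? = some c := by
        rw [List.getElem?_drop]
        have h2 : prev + (i - prev) = i := by omega
        rw [h2, hc]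
      simp [this]
    by_cases h : c = '"' ∨ c = '\''
    · by_cases hq : inq = true
      · by_cases h3 : some c = qc
        · rw [show pvSepsRec i (c :: rest') inq qc = pvSepsRec (i + 1) rest' false none from by
            simp [pvSepsRec, h, hq, h3]]
          rw [ih (i + 1) prev pairs false none hrest' (by omega) (by omega), hext]
          simp [pvSegs, h, hq, h3]
        · rw [show pvSepsRec i (c :: rest') inq qc = pvSepsRec (i + 1) rest' inq qc from by
            simp [pvSepsRec, h, hq, h3]]
          rw [ih (i + 1) prev pairs inq qc hrest' (by omega) (by omega), hext]
          simp [pvSegs, h, hq, h3]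
      · rw [show pvSepsRec i (c :: rest') inq qc = pvSepsRec (i + 1) rest' true (some c) from by
          simp [pvSepsRec, h, hq]]
        rw [ih (i + 1) prev pairs true (some c) hrest' (by omega) (by omega), hext]
        simp [pvSegs, h, hq]
    · by_cases h1 : c = ',' ∧ ¬ inq = true
      · -- comma: one fold step, then recurse with prev = i + 1
        rw [show pvSepsRec i (c :: rest') inq qc = (i : Int) :: pvSepsRec (i + 1) rest' inq qc from by
          simp [pvSepsRec, h, h1]]
        simp only [List.foldl_cons]
        have hstep : pvStep2 L (pairs, (prev : Int)) (i : Int)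
            = (pairs ++ [PySem.Str.strip (String.ofList ((L.drop prev).take (i - prev)))], ((i + 1 : Nat) : Int)) := by
          simp [pvStep2, PySem.List.slice_natCast]
        rw [hstep, ih (i + 1) (i + 1) _ inq qc hrest' (by omega) (by omega)]
        simp [pvSegs, h, h1]
      · rw [show pvSepsRec i (c :: rest') inq qc = pvSepsRec (i + 1) rest' inq qc from by
          simp only [pvSepsRec]; rw [if_neg h, if_neg h1]]
        rw [ih (i + 1) prev pairs inq qc hrest' (by omega) (by omega), hext]
        simp only [pvSegs]
        rw [if_neg h, if_neg h1]

-- ===== VERDICT (by name: the statement is the Claim_ definition above) =====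
theorem split_dict_pairs_py_spec : Claim_equal_split_dict_pairs_py := by
  intro content _
  unfold Spec_split_dict_pairs_py split_dict_pairs_py split_dict_pairs_py_alt
  have hA := pvA_runs content.toList [] [] false none
  have hB1 := pvB_firstPass content.toList 0 [] false none
  have hB2 := pvB_secondPass content.toList content.toList 0 0 [] false none rfl (by omega) (by omega)
  simp only [Nat.cast_zero, List.nil_append, List.drop_zero, Nat.sub_zero, List.take_zero]
    at hA hB1 hB2
  unfold pvStep2 at hB2
  have hB2' := hB2.symm
  rw [← hB1] at hB2'
  exact hA.trans hB2'
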